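-- pv_equiv track=rewrite | github.com/Jeetski/Chronos_Engine | Utilities/registry_builder.py | _extract_usage_lines
-- ===== SOURCE A (Python) =====
-- def _extract_usage_lines(help_text: str):
--     if not help_text:
--         return []
--     lines = help_text.splitlines()
--     usage_lines = []
--     capturing = False
--     for line in lines:
--         raw = line.rstrip()
--         stripped = raw.strip()
--         if not stripped:
--             if capturing:
--                 break
--             continue
--         if stripped.lower().startswith("usage:"):
--             capturing = True
--             usage_lines.append(stripped[len("usage:"):].strip())
--             continue
--         if capturing:
--             if stripped.lower().startswith(("description:", "example", "examples:", "notes:")):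
--                 break
--             usage_lines.append(stripped)
--     return [ln for ln in usage_lines if ln]
-- ===== SOURCE B (Python) =====
-- def _extract_usage_lines(help_text: str):
--     def usage(s):
--         return s.lower().startswith("usage:")
--
--     def header(s):
--         return s.lower().startswith(("description:", "example", "notes:"))
--
--     # group the stripped lines into paragraphs (maximal runs of nonempty lines)
--     paragraphs, current = [], []
--     for s in [ln.strip() for ln in help_text.splitlines()]:
--         if s:
--             current.append(s)
--         elif current:
--             paragraphs.append(current)
--             current = []
--     if current:
--         paragraphs.append(current)
--
--     # the first paragraph containing a usage line holds the whole answer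
--     for para in paragraphs:
--         hits = [i for i, s in enumerate(para) if usage(s)]
--         if hits:
--             tail = para[hits[0]:]
--             stops = [i for i, s in enumerate(tail) if header(s)]
--             block = tail[:stops[0]] if stops else tail
--             lines = [s[len("usage:"):].strip() if usage(s) else s for s in block]
--             return [s for s in lines if s]
--     return []
-- ===== Notes on version B (the rewrite author's own statement) =====
-- stated objective: alternative
-- what changed: Replaces A's one-pass capturing-flag state machine with a paragraph-segmentation algorithm: stripped lines are grouped into blank-separated paragraphs, and the first paragraph containing a usage line is processed declaratively with index-list comprehensions and slices (no flag, no break-driven accumulator, no trailing filter pass over captured state).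
import Mathlib
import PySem

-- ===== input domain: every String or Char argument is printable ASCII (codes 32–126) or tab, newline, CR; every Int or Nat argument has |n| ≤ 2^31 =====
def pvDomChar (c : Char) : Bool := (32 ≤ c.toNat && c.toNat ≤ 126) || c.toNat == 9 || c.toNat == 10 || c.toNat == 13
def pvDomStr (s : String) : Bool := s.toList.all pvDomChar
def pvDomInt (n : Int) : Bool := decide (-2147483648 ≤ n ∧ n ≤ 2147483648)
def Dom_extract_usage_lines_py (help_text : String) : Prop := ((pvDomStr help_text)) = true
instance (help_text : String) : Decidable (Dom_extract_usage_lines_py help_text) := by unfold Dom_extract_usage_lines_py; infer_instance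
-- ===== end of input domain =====

-- B replaces A's one-pass capturing-flag state machine by a paragraph-segmentation algorithm
-- (group stripped lines into blank-separated paragraphs, process the first paragraph containing
-- a usage line declaratively with index lists and slices); same return value (alternative).

-- ===== PORT A =====
-- literal port of A's loop: state = (usage_lines accumulator, capturing flag); break returns the accumulator
def pvAuxA : List String → List String → Bool → List String
  | [], usage_lines, _ => usage_lines
  | line :: rest, usage_lines, capturing =>
    let raw := PySem.Str.rstrip line
    let stripped := PySem.Str.strip raw
    if stripped = "" then
      (if capturing then usage_lines else pvAuxA rest usage_lines capturing)
    else if PySem.Str.startswith (PySem.Str.lower stripped) "usage:" then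
      pvAuxA rest (usage_lines ++ [PySem.Str.strip (PySem.Str.slice stripped (some 6) none)]) true
    else if capturing then
      (if PySem.Str.startswith (PySem.Str.lower stripped) "description:"
          || PySem.Str.startswith (PySem.Str.lower stripped) "example"
          || PySem.Str.startswith (PySem.Str.lower stripped) "examples:"
          || PySem.Str.startswith (PySem.Str.lower stripped) "notes:" then usage_lines
       else pvAuxA rest (usage_lines ++ [stripped]) capturing)
    else pvAuxA rest usage_lines capturing

def extract_usage_lines_py (help_text : String) : List String :=
  if help_text = "" then []
  else (pvAuxA (PySem.Str.splitlines help_text) [] false).filter (fun ln => !(ln == ""))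

-- ===== PORT B =====
-- Source B's helpers
def pvUsage (s : String) : Bool := PySem.Str.startswith (PySem.Str.lower s) "usage:"
def pvHeader (s : String) : Bool :=
  PySem.Str.startswith (PySem.Str.lower s) "description:"
  || PySem.Str.startswith (PySem.Str.lower s) "example"
  || PySem.Str.startswith (PySem.Str.lower s) "notes:"

-- Source B's segmentation loop: state = (paragraphs, current)
def pvSegStep (st : List (List String) × List String) (s : String) : List (List String) × List String :=
  if s ≠ "" then (st.1, st.2 ++ [s])
  else if st.2 ≠ [] then (st.1 ++ [st.2], [])
  else st

-- Source B's search loop over the paragraphs (the for-with-return)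
def pvSearch : List (List String) → List String
  | [] => []
  | para :: rest =>
    let hits := ((PySem.List.enumerate para).filter (fun p => pvUsage p.2)).map (·.1)
    match hits with
    | [] => pvSearch rest
    | h :: _ =>
      let tl := PySem.List.slice para (some h) none
      let stops := ((PySem.List.enumerate tl).filter (fun p => pvHeader p.2)).map (·.1)
      let block := match stops with
        | [] => tl
        | st0 :: _ => PySem.List.slice tl none (some st0)
      let lines := block.map (fun s =>
        if pvUsage s then PySem.Str.strip (PySem.Str.slice s (some 6) none) else s)
      lines.filter (fun s => !(s == ""))

def extract_usage_lines_py_alt (help_text : String) : List String :=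
  let st := ((PySem.Str.splitlines help_text).map PySem.Str.strip).foldl pvSegStep ([], [])
  let paragraphs := if st.2 ≠ [] then st.1 ++ [st.2] else st.1
  pvSearch paragraphs

-- ===== PRECONDITION & SPEC =====
def Spec_extract_usage_lines_py (help_text : String) (out : List String) : Prop := out = extract_usage_lines_py_alt help_text
instance (help_text : String) (out : List String) : Decidable (Spec_extract_usage_lines_py help_text out) := by unfold Spec_extract_usage_lines_py; infer_instance

-- ===== CLAIM (what is proved, stated in full; the proofs are below) =====
def Claim_equal_extract_usage_lines_py : Prop := ∀ (help_text : String), Dom_extract_usage_lines_py help_text → Spec_extract_usage_lines_py help_text (extract_usage_lines_py help_text)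

-- ===== LEMMAS AND PROOFS =====

theorem pv_rdw_cons {α : Type} (p : α → Bool) (a : α) (t : List α) (h : ∃ x ∈ t, p x = false) :
    List.rdropWhile p (a :: t) = a :: List.rdropWhile p t := by
  unfold List.rdropWhile
  have hne : List.dropWhile p t.reverse ≠ [] := by
    rw [Ne, List.dropWhile_eq_nil_iff]
    push_neg
    obtain ⟨x, hx, hpx⟩ := h
    exact ⟨x, by simpa using hx, by simp [hpx]⟩
  rw [show (a :: t).reverse = t.reverse ++ [a] by simp]
  rw [List.dropWhile_append]
  simp [List.isEmpty_iff, hne]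

theorem pv_rdw_dw_comm {α : Type} (p : α → Bool) (l : List α) :
    List.dropWhile p (List.rdropWhile p l) = List.rdropWhile p (List.dropWhile p l) := by
  induction l with
  | nil => simp
  | cons a t ih =>
    by_cases hp : p a = true
    case pos =>
      by_cases hall : ∀ x ∈ t, p x = true
      · have ht : List.dropWhile p t = [] := List.dropWhile_eq_nil_iff.mpr (by simpa using hall)
        have h1 : List.rdropWhile p (a :: t) = [] := by
          rw [List.rdropWhile_eq_nil_iff]
          intro x hx
          rcases List.mem_cons.mp hx with rfl | hx
          · exact hp
          · exact hall x hx
        simp [h1, List.dropWhile_cons, hp, ht]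
      · push_neg at hall
        have hex : ∃ x ∈ t, p x = false := by
          obtain ⟨x, hx, hpx⟩ := hall; exact ⟨x, hx, by simpa using hpx⟩
        rw [pv_rdw_cons p a t hex, List.dropWhile_cons_of_pos hp, ih,
          List.dropWhile_cons, hp]
        simp
    case neg =>
      have hb : p a = false := by simpa using hp
      have h2 : List.dropWhile p (a :: t) = a :: t := by
        rw [List.dropWhile_cons, hb]; simp
      rw [h2]
      by_cases hall : ∀ x ∈ t, p x = true
      · have h1 : List.rdropWhile p (a :: t) = [a] := by
          unfold List.rdropWhile
          rw [show (a :: t).reverse = t.reverse ++ [a] by simp]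
          rw [List.dropWhile_append]
          have : List.dropWhile p t.reverse = [] :=
            List.dropWhile_eq_nil_iff.mpr (by simpa using hall)
          simp [this, List.dropWhile_cons, hb]
        rw [h1]
        have h3 : List.rdropWhile p (a :: t) = [a] := h1
        rw [List.dropWhile_cons, hb]
        simp [h3]
      · push_neg at hall
        have hex : ∃ x ∈ t, p x = false := by
          obtain ⟨x, hx, hpx⟩ := hall; exact ⟨x, hx, by simpa using hpx⟩
        rw [pv_rdw_cons p a t hex, List.dropWhile_cons, hb]
        simp

theorem chars_rstrip_eq (cs : List Char) : PySem.Chars.rstrip cs = List.rdropWhile PySem.Chars.isspace cs := rfl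
theorem chars_lstrip_eq (cs : List Char) : PySem.Chars.lstrip cs = List.dropWhile PySem.Chars.isspace cs := rfl

theorem pv_strip_rstrip (s : String) : PySem.Str.strip (PySem.Str.rstrip s) = PySem.Str.strip s := by
  apply String.toList_inj.mp
  simp only [PySem.Str.toList_strip, PySem.Str.toList_rstrip]
  show PySem.Chars.strip (PySem.Chars.rstrip s.toList) = PySem.Chars.strip s.toList
  unfold PySem.Chars.strip
  rw [chars_rstrip_eq, chars_rstrip_eq, chars_lstrip_eq, chars_lstrip_eq, chars_rstrip_eq,
    pv_rdw_dw_comm, List.rdropWhile_idempotent]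

theorem pv_sw_imp (low : String) (p q : String) (hlen : p.toList.length ≤ q.toList.length)
    (hq : ¬ p.toList <+: q.toList) (h1 : PySem.Str.startswith low p = true) :
    PySem.Str.startswith low q = false := by
  rw [PySem.Str.startswith_eq] at *
  rw [PySem.Chars.startswith_iff] at h1
  by_contra hc
  rw [Bool.not_eq_false, PySem.Chars.startswith_iff] at hc
  exact hq (List.prefix_of_prefix_length_le h1 hc hlen)

theorem pv_headerA_eq (low : String) :
    (PySem.Str.startswith low "description:" || PySem.Str.startswith low "example"
      || PySem.Str.startswith low "examples:" || PySem.Str.startswith low "notes:")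
    = (PySem.Str.startswith low "description:" || PySem.Str.startswith low "example"
      || PySem.Str.startswith low "notes:") := by
  by_cases h : PySem.Str.startswith low "examples:" = true
  · have h2 : PySem.Str.startswith low "example" = true := by
      rw [PySem.Str.startswith_eq, PySem.Chars.startswith_iff] at h ⊢
      exact List.IsPrefix.trans (by decide) h
    rw [h, h2]
    simp
  · have h' : PySem.Str.startswith low "examples:" = false := Bool.eq_false_iff.mpr h
    rw [h']
    simp

theorem pv_usage_not_header (s : String) (h : pvUsage s = true) : pvHeader s = false := by
  unfold pvUsage at h
  unfold pvHeader
  rw [pv_sw_imp _ "usage:" "description:" (by decide) (by decide) h,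
      pv_sw_imp _ "usage:" "example" (by decide) (by decide) h,
      pv_sw_imp _ "usage:" "notes:" (by decide) (by decide) h]
  rfl

def pvCollect : List String → List String
  | [] => []
  | s :: rest =>
    if s = "" then []
    else if pvUsage s then
      (let t := PySem.Str.strip (PySem.Str.slice s (some 6) none); if t = "" then [] else [t]) ++ pvCollect rest
    else if pvHeader s then []
    else s :: pvCollect rest

def pvFind : List String → List String
  | [] => []
  | s :: rest => if pvUsage s then pvCollect (s :: rest) else pvFind rest

theorem pv_auxA_true (lines acc : List String) :
    (pvAuxA lines acc true).filter (fun ln => !(ln == "")) =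
      acc.filter (fun ln => !(ln == "")) ++ pvCollect (lines.map PySem.Str.strip) := by
  induction lines generalizing acc with
  | nil => simp [pvAuxA, pvCollect]
  | cons line rest ih =>
    simp only [pvAuxA, List.map_cons, pv_strip_rstrip]
    by_cases h0 : PySem.Str.strip line = ""
    · simp [h0, pvCollect]
    · by_cases hu : pvUsage (PySem.Str.strip line) = true
      · have hu' := hu
        unfold pvUsage at hu'
        simp only [h0, hu', if_true, if_false, ite_false]
        rw [ih, List.filter_append]
        simp only [pvCollect, if_neg h0, hu, if_true]
        by_cases ht : PySem.Str.strip (PySem.Str.slice (PySem.Str.strip line) (some 6) none) = ""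
        · simp [ht]
        · simp [ht]
      · have hu' : PySem.Str.startswith (PySem.Str.lower (PySem.Str.strip line)) "usage:" = false := by
          unfold pvUsage at hu; simpa using hu
        simp only [if_neg h0, hu', Bool.false_eq_true, if_false, if_true]
        rw [pv_headerA_eq]
        by_cases hh : pvHeader (PySem.Str.strip line) = true
        · have hh' := hh; unfold pvHeader at hh'
          simp only [hh', if_true]
          simp [pvCollect, h0, hu, hh]
        · have hh' : (PySem.Str.startswith (PySem.Str.lower (PySem.Str.strip line)) "description:"
              || PySem.Str.startswith (PySem.Str.lower (PySem.Str.strip line)) "example"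
              || PySem.Str.startswith (PySem.Str.lower (PySem.Str.strip line)) "notes:") = false := by
            unfold pvHeader at hh; simpa using hh
          simp only [hh', Bool.false_eq_true, if_false, ih, List.filter_append]
          simp [pvCollect, h0, hu, Bool.eq_false_iff.mpr hh, h0]

theorem pv_auxA_false (lines acc : List String) :
    (pvAuxA lines acc false).filter (fun ln => !(ln == "")) =
      acc.filter (fun ln => !(ln == "")) ++ pvFind (lines.map PySem.Str.strip) := by
  induction lines generalizing acc with
  | nil => simp [pvAuxA, pvFind]
  | cons line rest ih =>
    simp only [pvAuxA, List.map_cons, pv_strip_rstrip]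
    by_cases h0 : PySem.Str.strip line = ""
    · have hu0 : pvUsage (PySem.Str.strip line) = false := by
        rw [h0]; decide
      rw [h0] at hu0
      simp only [h0, if_true]
      rw [if_neg (by simp), ih]
      simp [pvFind, hu0]
    · by_cases hu : pvUsage (PySem.Str.strip line) = true
      · have hu' := hu; unfold pvUsage at hu'
        simp only [if_neg h0, hu', if_true]
        rw [pv_auxA_true, List.filter_append]
        simp only [pvFind, hu, if_true, pvCollect, if_neg h0, hu]
        by_cases ht : PySem.Str.strip (PySem.Str.slice (PySem.Str.strip line) (some 6) none) = ""
        · simp [ht]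
        · simp [ht]
      · have hu' : PySem.Str.startswith (PySem.Str.lower (PySem.Str.strip line)) "usage:" = false := by
          unfold pvUsage at hu; simpa using hu
        simp only [if_neg h0, hu', Bool.false_eq_true, if_false]
        rw [ih]
        simp [pvFind, Bool.eq_false_iff.mpr hu]

def pvIdxsN (q : String → Bool) : Nat → List String → List Nat
  | _, [] => []
  | n, x :: xs => (if q x then [n] else []) ++ pvIdxsN q (n+1) xs

theorem pv_idxs_eq (q : String → Bool) (n : Nat) (xs : List String) :
    ((PySem.List.enumerate xs (n : Int)).filter (fun p => q p.2)).map (·.1)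
      = (pvIdxsN q n xs).map (fun (j : Nat) => (j : Int)) := by
  induction xs generalizing n with
  | nil => simp [pvIdxsN, PySem.List.enumerate_nil]
  | cons x xs ih =>
    rw [PySem.List.enumerate_cons]
    simp only [pvIdxsN, List.filter_cons, List.map_append]
    have hcast : ((n : Int) + 1) = ((n + 1 : Nat) : Int) := by push_cast; ring
    by_cases hq : q x = true
    · simp only [hq, if_true, List.map_cons, List.singleton_append, List.map_nil]
      rw [hcast, ih]
    · have hq' : q x = false := Bool.eq_false_iff.mpr hq
      simp only [hq', Bool.false_eq_true, if_false, List.nil_append, List.map_nil]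
      rw [hcast, ih]

theorem pv_idxsN_nil_iff (q : String → Bool) (n : Nat) (xs : List String) :
    pvIdxsN q n xs = [] ↔ ∀ x ∈ xs, q x = false := by
  induction xs generalizing n with
  | nil => simp [pvIdxsN]
  | cons x xs ih =>
    simp only [pvIdxsN, List.append_eq_nil_iff, List.mem_cons]
    constructor
    · rintro ⟨h1, h2⟩
      intro y hy
      rcases hy with rfl | hy
      · by_cases hq : q y = true
        · rw [hq] at h1; simp at h1
        · exact Bool.eq_false_iff.mpr hq
      · exact (ih (n+1)).mp h2 y hy
    · intro h
      refine ⟨by simp [h x (Or.inl rfl)], (ih (n+1)).mpr fun y hy => h y (Or.inr hy)⟩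

theorem pv_idxsN_append (q : String → Bool) (n : Nat) (pre ys : List String)
    (h : ∀ x ∈ pre, q x = false) :
    pvIdxsN q n (pre ++ ys) = pvIdxsN q (n + pre.length) ys := by
  induction pre generalizing n with
  | nil => simp
  | cons a pre ih =>
    simp only [List.cons_append, pvIdxsN, h a (by simp), Bool.false_eq_true, if_false,
      List.nil_append, List.length_cons]
    rw [ih (n+1) (fun x hx => h x (by simp [hx]))]
    congr 1
    omega

def pvSegC (cur : List String) : List String → List (List String)
  | [] => if cur ≠ [] then [cur] else []
  | s :: rest => if s ≠ "" then pvSegC (cur ++ [s]) rest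
                 else if cur ≠ [] then cur :: pvSegC [] rest else pvSegC [] rest

theorem pv_seg_fold (L : List String) (paras : List (List String)) (cur : List String) :
    (let st := L.foldl pvSegStep (paras, cur);
     if st.2 ≠ [] then st.1 ++ [st.2] else st.1) = paras ++ pvSegC cur L := by
  induction L generalizing paras cur with
  | nil =>
    simp only [List.foldl_nil, pvSegC]
    by_cases h : cur = [] <;> simp [h]
  | cons s rest ih =>
    simp only [List.foldl_cons]
    by_cases hs : s = ""
    · subst hs
      by_cases hc : cur = []
      · subst hc
        rw [show pvSegStep (paras, []) "" = (paras, []) from by simp [pvSegStep]]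
        rw [ih paras []]
        simp [pvSegC]
      · rw [show pvSegStep (paras, cur) "" = (paras ++ [cur], []) from by simp [pvSegStep, hc]]
        rw [ih (paras ++ [cur]) []]
        simp [pvSegC, hc]
    · rw [show pvSegStep (paras, cur) s = (paras, cur ++ [s]) from by simp [pvSegStep, hs]]
      rw [ih paras (cur ++ [s])]
      simp [pvSegC, hs]

def pvProc (para : List String) : List String :=
  let hits := ((PySem.List.enumerate para).filter (fun p => pvUsage p.2)).map (·.1)
  match hits with
  | [] => []
  | h :: _ =>
    let tl := PySem.List.slice para (some h) none
    let stops := ((PySem.List.enumerate tl).filter (fun p => pvHeader p.2)).map (·.1)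
    let block := match stops with
      | [] => tl
      | st0 :: _ => PySem.List.slice tl none (some st0)
    let lines := block.map (fun s =>
      if pvUsage s then PySem.Str.strip (PySem.Str.slice s (some 6) none) else s)
    lines.filter (fun s => !(s == ""))

theorem pv_idxs_eq_zero (q : String → Bool) (xs : List String) :
    ((PySem.List.enumerate xs).filter (fun p => q p.2)).map (·.1)
      = (pvIdxsN q 0 xs).map (fun (j : Nat) => (j : Int)) := by
  have h := pv_idxs_eq q 0 xs
  simpa using h

theorem pv_idxs_nil (q : String → Bool) (xs : List String) (h : pvIdxsN q 0 xs = []) :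
    ((PySem.List.enumerate xs).filter (fun p => q p.2)).map (·.1) = [] := by
  rw [pv_idxs_eq_zero, h, List.map_nil]

theorem pv_idxs_cons (q : String → Bool) (xs : List String) (n : Nat) (ns : List Nat)
    (h : pvIdxsN q 0 xs = n :: ns) :
    ((PySem.List.enumerate xs).filter (fun p => q p.2)).map (·.1)
      = ((n : Int)) :: ns.map (fun (j : Nat) => (j : Int)) := by
  rw [pv_idxs_eq_zero, h, List.map_cons]

theorem pv_idxsN_succ (q : String → Bool) (n : Nat) (xs : List String) :
    pvIdxsN q (n+1) xs = (pvIdxsN q n xs).map (· + 1) := by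
  induction xs generalizing n with
  | nil => simp [pvIdxsN]
  | cons x xs ih =>
    simp only [pvIdxsN, List.map_append]
    rw [ih (n+1)]
    by_cases hq : q x = true <;> simp [hq]

def pvMapFilt (block : List String) : List String :=
  (block.map (fun s =>
      if pvUsage s then PySem.Str.strip (PySem.Str.slice s (some 6) none) else s)).filter
    (fun s => !(s == ""))

def pvBlockN (tl : List String) : List String :=
  pvMapFilt (match pvIdxsN pvHeader 0 tl with
    | [] => tl
    | n :: _ => tl.take n)

theorem pv_search_cons (para : List String) (rest : List (List String)) :
    pvSearch (para :: rest) =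
      if (∀ x ∈ para, pvUsage x = false) then pvSearch rest else pvProc para := by
  simp only [pvSearch, pvProc]
  cases hN : pvIdxsN pvUsage 0 para with
  | nil =>
    rw [pv_idxs_nil pvUsage para hN, if_pos ((pv_idxsN_nil_iff _ _ _).mp hN)]
  | cons j js =>
    rw [pv_idxs_cons pvUsage para j js hN,
      if_neg (fun hall => by rw [(pv_idxsN_nil_iff _ _ _).mpr hall] at hN; simp at hN)]

theorem pv_blockN_of_proc (tl : List String) :
    (let stops := ((PySem.List.enumerate tl).filter (fun p => pvHeader p.2)).map (·.1)
     let block := match stops with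
       | [] => tl
       | st0 :: _ => PySem.List.slice tl none (some st0)
     (block.map (fun s =>
         if pvUsage s then PySem.Str.strip (PySem.Str.slice s (some 6) none) else s)).filter
       (fun s => !(s == ""))) = pvBlockN tl := by
  cases hN : pvIdxsN pvHeader 0 tl with
  | nil =>
    rw [pv_idxs_nil pvHeader tl hN]
    simp only [pvBlockN, pvMapFilt, hN]
  | cons n ns =>
    rw [pv_idxs_cons pvHeader tl n ns hN]
    simp only [PySem.List.slice_to_natCast, pvBlockN, pvMapFilt, hN]

theorem pv_proc_eqN (para : List String) :
    pvProc para = (match pvIdxsN pvUsage 0 para with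
      | [] => []
      | h :: _ => pvBlockN (para.drop h)) := by
  simp only [pvProc]
  cases hN : pvIdxsN pvUsage 0 para with
  | nil => rw [pv_idxs_nil pvUsage para hN]
  | cons j js =>
    rw [pv_idxs_cons pvUsage para j js hN]
    simp only [PySem.List.slice_from_natCast]
    exact pv_blockN_of_proc (para.drop j)

theorem pv_blockN_cons (x : String) (xs : List String) :
    pvBlockN (x :: xs) =
      if pvHeader x then []
      else ([if pvUsage x then PySem.Str.strip (PySem.Str.slice x (some 6) none) else x].filter
              (fun s => !(s == ""))) ++ pvBlockN xs := by
  simp only [pvBlockN, pvIdxsN]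
  by_cases hh : pvHeader x = true
  · simp [hh, pvMapFilt]
  · have hh' : pvHeader x = false := Bool.eq_false_iff.mpr hh
    simp only [hh', Bool.false_eq_true, if_false, List.nil_append]
    rw [pv_idxsN_succ]
    cases h0 : pvIdxsN pvHeader 0 xs with
    | nil =>
      by_cases hx : (if pvUsage x then PySem.Str.strip (PySem.Str.slice x (some 6) none) else x) = "" <;>
        simp [pvMapFilt, List.filter_cons, hx]
    | cons j js =>
      by_cases hx : (if pvUsage x then PySem.Str.strip (PySem.Str.slice x (some 6) none) else x) = "" <;>
        simp [pvMapFilt, List.filter_cons, hx, List.map_take]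

theorem pv_blockN_takeWhile (L : List String) :
    pvBlockN (L.takeWhile (fun s => !(s == ""))) = pvCollect L := by
  induction L with
  | nil => rfl
  | cons s r ih =>
    by_cases hs : s = ""
    · subst hs
      rw [show List.takeWhile (fun s => !(s == "")) ("" :: r) = [] from by simp [List.takeWhile_cons]]
      rfl
    · rw [show List.takeWhile (fun s => !(s == "")) (s :: r)
          = s :: List.takeWhile (fun s => !(s == "")) r from by simp [List.takeWhile_cons, hs]]
      rw [pv_blockN_cons, ih]
      by_cases hu : pvUsage s = true
      · rw [if_neg (by simp [pv_usage_not_header s hu])]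
        simp only [pvCollect, if_neg hs, hu, if_true]
        by_cases ht : PySem.Str.strip (PySem.Str.slice s (some 6) none) = "" <;>
          simp [List.filter_cons, ht, hu]
      · have hu' : pvUsage s = false := Bool.eq_false_iff.mpr hu
        by_cases hh : pvHeader s = true
        · simp [hh, pvCollect, hs, hu']
        · have hh' : pvHeader s = false := Bool.eq_false_iff.mpr hh
          simp [hh', pvCollect, hs, hu', List.filter_cons]

theorem pv_proc_prefix (pre suf : List String) (s : String)
    (hpre : ∀ x ∈ pre, pvUsage x = false) (hs : pvUsage s = true) :
    pvProc (pre ++ s :: suf) = pvBlockN (s :: suf) := by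
  rw [pv_proc_eqN]
  rw [pv_idxsN_append pvUsage 0 pre (s :: suf) hpre]
  simp only [Nat.zero_add, pvIdxsN, hs, if_true, List.singleton_append]
  rw [List.drop_left]

theorem pv_segD (L : List String) (cur : List String) (hne : ∀ x ∈ cur, ¬x = "")
    (hus : ∃ x ∈ cur, pvUsage x = true) :
    pvSearch (pvSegC cur L) = pvProc (cur ++ L.takeWhile (fun s => !(s == ""))) := by
  induction L generalizing cur with
  | nil =>
    have hc : cur ≠ [] := by rintro rfl; simp at hus
    simp only [pvSegC, if_pos hc, pv_search_cons]
    rw [if_neg (fun hall => by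
      obtain ⟨x, hx, hux⟩ := hus; rw [hall x hx] at hux; simp at hux)]
    simp [List.takeWhile_nil]
  | cons s r ih =>
    by_cases hs : s = ""
    · subst hs
      have hc : cur ≠ [] := by rintro rfl; simp at hus
      simp only [pvSegC, if_neg (by simp : ¬("" : String) ≠ ""), if_pos hc, pv_search_cons]
      rw [if_neg (fun hall => by
        obtain ⟨x, hx, hux⟩ := hus; rw [hall x hx] at hux; simp at hux)]
      rw [show List.takeWhile (fun s => !(s == "")) ("" :: r) = [] from by simp [List.takeWhile_cons]]
      simp
    · simp only [pvSegC, if_pos (by simpa using hs : (s : String) ≠ "")]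
      rw [ih (cur ++ [s])
        (by intro x hx; rcases List.mem_append.mp hx with h | h
            · exact hne x h
            · simp at h; subst h; exact hs)
        (by obtain ⟨x, hx, hux⟩ := hus; exact ⟨x, List.mem_append.mpr (Or.inl hx), hux⟩)]
      rw [show List.takeWhile (fun s => !(s == "")) (s :: r)
          = s :: List.takeWhile (fun s => !(s == "")) r from by simp [List.takeWhile_cons, hs]]
      simp [List.append_assoc]

theorem pv_segM (L : List String) (cur : List String) (hne : ∀ x ∈ cur, ¬x = "")
    (hall : ∀ x ∈ cur, pvUsage x = false) :
    pvSearch (pvSegC cur L) = pvFind L := by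
  induction L generalizing cur with
  | nil =>
    by_cases hc : cur = []
    · subst hc; simp [pvSegC, pvSearch, pvFind]
    · simp only [pvSegC, if_pos hc, pv_search_cons, if_pos hall]
      rfl
  | cons s r ih =>
    by_cases hs : s = ""
    · subst hs
      have hu0 : pvUsage "" = false := by decide
      by_cases hc : cur = []
      · subst hc
        simp only [pvSegC, if_neg (by simp : ¬("" : String) ≠ ""), if_neg (by simp : ¬([] : List String) ≠ [])]
        rw [ih [] (by simp) (by simp)]
        simp [pvFind, hu0]
      · simp only [pvSegC, if_neg (by simp : ¬("" : String) ≠ ""), if_pos hc, pv_search_cons,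
          if_pos hall]
        rw [ih [] (by simp) (by simp)]
        simp [pvFind, hu0]
    · by_cases hu : pvUsage s = true
      · simp only [pvSegC, if_pos (by simpa using hs : (s : String) ≠ "")]
        rw [pv_segD r (cur ++ [s])
          (by intro x hx; rcases List.mem_append.mp hx with h | h
              · exact hne x h
              · simp at h; subst h; exact hs)
          ⟨s, List.mem_append.mpr (Or.inr (by simp)), hu⟩]
        rw [List.append_assoc, List.singleton_append, pv_proc_prefix cur _ s hall hu]
        rw [show s :: List.takeWhile (fun s => !(s == "")) r
            = List.takeWhile (fun s => !(s == "")) (s :: r) from by simp [List.takeWhile_cons, hs]]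
        rw [pv_blockN_takeWhile]
        simp [pvFind, hu]
      · have hu' : pvUsage s = false := Bool.eq_false_iff.mpr hu
        simp only [pvSegC, if_pos (by simpa using hs : (s : String) ≠ "")]
        rw [ih (cur ++ [s])
          (by intro x hx; rcases List.mem_append.mp hx with h | h
              · exact hne x h
              · simp at h; subst h; exact hs)
          (by intro x hx; rcases List.mem_append.mp hx with h | h
              · exact hall x h
              · simp at h; subst h; exact hu')]
        simp [pvFind, hu']

-- ===== VERDICT (by name: the statement is the Claim_ definition above) =====
theorem extract_usage_lines_py_spec : Claim_equal_extract_usage_lines_py := by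
  intro help_text _
  unfold Spec_extract_usage_lines_py extract_usage_lines_py extract_usage_lines_py_alt
  simp only [pv_seg_fold, List.nil_append]
  by_cases h : help_text = ""
  · subst h; decide
  · simp only [h, if_false, pv_auxA_false, List.filter_nil, List.nil_append,
      pv_segM _ [] (by simp) (by simp)]
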